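-- pv_equiv track=rewrite | github.com/TwinKay/Algorithms | 프로그래머스/lv1/12917. 문자열 내림차순으로 배치하기/문자열 내림차순으로 배치하기.py | solution
-- ===== SOURCE A (Python) =====
-- def solution(s):
--     answer = ''
--     up = []
--     lo = []
--     for i in s:
--         if i.isupper() == True:
--             up.append(i)
--         else:
--             lo.append(i)
--     up.sort(reverse = True)
--     lo.sort(reverse = True)
--
--     return ''.join(lo)+''.join(up)
-- ===== SOURCE B (Python) =====
-- def solution(s):
--     # Counting sort over the fixed 128-slot ASCII alphabet: O(n + 128) instead of O(n log n).
--     cnt = {}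
--     for ch in s:
--         cnt[ch] = cnt.get(ch, 0) + 1
--     lo = ''.join(chr(i) * cnt.get(chr(i), 0) for i in range(127, -1, -1) if not (65 <= i <= 90))
--     up = ''.join(chr(i) * cnt.get(chr(i), 0) for i in range(90, 64, -1))
--     return lo + up
-- ===== Notes on version B (the rewrite author's own statement) =====
-- stated objective: faster
-- what changed: Replaces A's two comparison sorts (list.sort(reverse=True)) by a single counting pass into a dict plus one descending sweep over the fixed 128-code ASCII alphabet.
import Mathlib
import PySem

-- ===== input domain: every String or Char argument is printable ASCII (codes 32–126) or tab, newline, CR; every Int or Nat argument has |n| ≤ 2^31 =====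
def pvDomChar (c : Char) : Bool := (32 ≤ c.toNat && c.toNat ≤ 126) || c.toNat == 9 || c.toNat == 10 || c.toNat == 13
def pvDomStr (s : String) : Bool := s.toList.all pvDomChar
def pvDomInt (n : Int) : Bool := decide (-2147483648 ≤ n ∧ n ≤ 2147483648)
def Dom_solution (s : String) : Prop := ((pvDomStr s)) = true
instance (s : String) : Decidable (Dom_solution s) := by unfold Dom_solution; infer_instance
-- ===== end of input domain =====

-- B replaces A's two comparison sorts by a counting sort over the fixed 128-slot ASCII alphabet (objective: faster).

-- ===== PORT A =====
-- one loop splits s into up/lo, each list is sorted descending, lo comes first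
def solution (s : String) : String :=
  let p := s.toList.foldl
    (fun (p : List Char × List Char) i =>
      if PySem.Chars.isupper i == true then (p.1 ++ [i], p.2) else (p.1, p.2 ++ [i]))
    ([], [])
  String.ofList (PySem.List.sorted p.2 (fun x => x) true ++ PySem.List.sorted p.1 (fun x => x) true)

-- ===== PORT B =====
-- counting dict, then one descending sweep over the ASCII codes (non-uppercase codes, then uppercase codes)
def solution_alt (s : String) : String :=
  let cnt := s.toList.foldl
    (fun (d : PySem.Dict Char Int) ch => d.insert ch (d.getD ch 0 + 1)) PySem.Dict.empty
  let lo := ((PySem.List.pyRange 127 (-1) (-1)).filter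
      (fun i => !(decide (65 ≤ i) && decide (i ≤ 90)))).flatMap
    (fun i => PySem.List.pyRepeat [Char.ofNat i.toNat] (cnt.getD (Char.ofNat i.toNat) 0))
  let up := (PySem.List.pyRange 90 64 (-1)).flatMap
    (fun i => PySem.List.pyRepeat [Char.ofNat i.toNat] (cnt.getD (Char.ofNat i.toNat) 0))
  String.ofList (lo ++ up)

-- ===== PRECONDITION & SPEC =====
def Spec_solution (s : String) (out : String) : Prop := out = solution_alt s
instance (s : String) (out : String) : Decidable (Spec_solution s out) := by unfold Spec_solution; infer_instance

-- ===== CLAIM (what is proved, stated in full; the proofs are below) =====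
def Claim_equal_solution : Prop := ∀ (s : String), Dom_solution s → Spec_solution s (solution s)

-- ===== LEMMAS AND PROOFS =====

lemma char_le_iff (a b : Char) : (a ≤ b) ↔ a.toNat ≤ b.toNat := by
  rw [Char.le_def, UInt32.le_iff_toNat_le]; rfl

lemma char_eq_of_toNat (a b : Char) (h : a.toNat = b.toNat) : a = b := by
  cases a; cases b; simp [Char.toNat] at h; simp; exact UInt32.toNat_inj.mp h

-- On ASCII, Python's single-char isupper() is exactly the code range 65..90.
set_option maxRecDepth 4096 in
lemma isupper_ascii (c : Char) (h : c.toNat < 128) :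
    PySem.Chars.isupper c = decide (65 ≤ c.toNat ∧ c.toNat ≤ 90) := by
  have key : ∀ n ∈ List.range 128,
      PySem.Chars.isupper (Char.ofNat n)
        = decide (65 ≤ (Char.ofNat n).toNat ∧ (Char.ofNat n).toNat ≤ 90) := by decide
  have := key c.toNat (List.mem_range.mpr h)
  rwa [Char.ofNat_toNat] at this

-- codes below 128 round-trip through Char.ofNat
set_option maxRecDepth 4096 in
lemma toNat_ofNat_small (d : Int) (h0 : 0 ≤ d) (h1 : d < 128) :
    ((Char.ofNat d.toNat).toNat : Int) = d := by
  have key : ∀ n ∈ List.range 128, (Char.ofNat n).toNat = n := by decide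
  have hd : d.toNat < 128 := by omega
  have := key d.toNat (List.mem_range.mpr hd)
  rw [this]; omega

-- the flatMap of replicates is a permutation of l
lemma countsort_perm (D : List Int) (l : List Char)
    (hnd : D.Nodup)
    (hval : ∀ d ∈ D, 0 ≤ d ∧ d < 128)
    (hmem : ∀ c ∈ l, (c.toNat : Int) ∈ D) :
    (D.flatMap (fun i => List.replicate (l.count (Char.ofNat i.toNat)) (Char.ofNat i.toNat))).Perm l := by
  induction D generalizing l with
  | nil =>
    cases l with
    | nil => simp
    | cons c t => exact absurd (hmem c (List.mem_cons_self)) (List.not_mem_nil)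
  | cons d D ih =>
    have hd := hval d (List.mem_cons_self)
    have hdnat : ((Char.ofNat d.toNat).toNat : Int) = d := toNat_ofNat_small d hd.1 hd.2
    set a := Char.ofNat d.toNat with ha
    -- the remaining chars
    set l' := l.filter (fun c => !(c == a)) with hl'
    have hcongr : D.flatMap (fun i => List.replicate (l.count (Char.ofNat i.toNat)) (Char.ofNat i.toNat))
        = D.flatMap (fun i => List.replicate (l'.count (Char.ofNat i.toNat)) (Char.ofNat i.toNat)) := by
      unfold List.flatMap
      congr 1
      refine List.map_congr_left (fun i hi => ?_)
      have hi' := hval i (List.mem_cons_of_mem _ hi)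
      have hine : Char.ofNat i.toNat ≠ a := by
        intro hEq
        have : (i : Int) = d := by
          rw [← toNat_ofNat_small i hi'.1 hi'.2, hEq, hdnat]
        exact (List.nodup_cons.mp hnd).1 (this ▸ hi)
      rw [hl', List.count_filter (by simp [hine])]
    have hmem' : ∀ c ∈ l', (c.toNat : Int) ∈ D := by
      intro c hc
      have hcl := List.mem_filter.mp hc
      have := hmem c hcl.1
      rcases List.mem_cons.mp this with h | h
      · exfalso
        have : c = a := char_eq_of_toNat c a (by omega)
        simp [this] at hcl
      · exact h
    have hperm' := ih l' (List.nodup_cons.mp hnd).2 (fun x hx => hval x (List.mem_cons_of_mem _ hx)) hmem'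
    rw [List.flatMap_cons, hcongr]
    refine List.Perm.trans (hperm'.append_left _) ?_
    rw [← List.filter_beq a]
    exact List.filter_append_perm _ l

-- descending codes give a descending character list
lemma countsort_pairwise (D : List Int) (l : List Char)
    (hpw : D.Pairwise (· > ·))
    (hval : ∀ d ∈ D, 0 ≤ d ∧ d < 128) :
    (D.flatMap (fun i => List.replicate (l.count (Char.ofNat i.toNat)) (Char.ofNat i.toNat))).Pairwise
      (fun a b => b ≤ a) := by
  induction D with
  | nil => simp
  | cons d D ih =>
    have hd := hval d (List.mem_cons_self)
    rw [List.flatMap_cons, List.pairwise_append]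
    refine ⟨List.pairwise_replicate.mpr (Or.inr le_rfl), ih (List.pairwise_cons.mp hpw).2
      (fun x hx => hval x (List.mem_cons_of_mem _ hx)), ?_⟩
    intro x hx y hy
    have hxa := List.eq_of_mem_replicate hx
    obtain ⟨i, hi, hyi⟩ := List.mem_flatMap.mp hy
    have hyc := List.eq_of_mem_replicate hyi
    have hi' := hval i (List.mem_cons_of_mem _ hi)
    have hgt : i < d := (List.pairwise_cons.mp hpw).1 i hi
    rw [hxa, hyc, char_le_iff]
    have h1 := toNat_ofNat_small i hi'.1 hi'.2
    have h2 := toNat_ofNat_small d hd.1 hd.2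
    omega

-- main lemma: descending counting sweep = sorted(…, reverse=True)
lemma countsort_eq_sorted (D : List Int) (l : List Char)
    (hpw : D.Pairwise (· > ·))
    (hval : ∀ d ∈ D, 0 ≤ d ∧ d < 128)
    (hmem : ∀ c ∈ l, (c.toNat : Int) ∈ D) :
    PySem.List.sorted l (fun x => x) true
      = D.flatMap (fun i => List.replicate (l.count (Char.ofNat i.toNat)) (Char.ofNat i.toNat)) := by
  have hnd : D.Nodup := hpw.imp (fun h => ne_of_gt h)
  have hperm := countsort_perm D l hnd hval hmem
  have hp2 := countsort_pairwise D l hpw hval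
  have hp1 := PySem.List.sorted_pairwise_rev l (fun x : Char => x)
  refine PySem.List.eq_of_perm_of_pairwise_le_of_injective
    (fun c : Char => -(c.toNat : Int)) ?_ ?_ ?_ ?_
  · intro a b h
    simp only [neg_inj, Nat.cast_inj] at h
    exact char_eq_of_toNat a b h
  · exact (PySem.List.sorted_perm l (fun x => x) true).trans hperm.symm
  · exact hp1.imp (fun {a b} h => by
      simp only [neg_le_neg_iff, Nat.cast_le]
      exact (char_le_iff b a).mp h)
  · exact hp2.imp (fun {a b} h => by
      simp only [neg_le_neg_iff, Nat.cast_le]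
      exact (char_le_iff b a).mp h)

-- A's loop is a partition into the non-uppercase and uppercase filters
lemma solution_eq_filters (s : String) :
    solution s = String.ofList
      (PySem.List.sorted (s.toList.filter (fun c => !PySem.Chars.isupper c)) (fun x => x) true
        ++ PySem.List.sorted (s.toList.filter (fun c => PySem.Chars.isupper c)) (fun x => x) true) := by
  have hfun : (fun (p : List Char × List Char) i =>
        if PySem.Chars.isupper i == true then (p.1 ++ [i], p.2) else (p.1, p.2 ++ [i]))
      = fun (p : List Char × List Char) i =>
          ((fun (u : List Char) i => if PySem.Chars.isupper i = true then u ++ [i] else u) p.1 i,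
           (fun (v : List Char) i => if (!PySem.Chars.isupper i) = true then v ++ [i] else v) p.2 i) := by
    funext p i; by_cases h : PySem.Chars.isupper i <;> simp [h]
  have hsplit : s.toList.foldl (fun (p : List Char × List Char) i =>
        if PySem.Chars.isupper i == true then (p.1 ++ [i], p.2) else (p.1, p.2 ++ [i])) ([], [])
      = (s.toList.filter (fun c => PySem.Chars.isupper c),
         s.toList.filter (fun c => !PySem.Chars.isupper c)) := by
    rw [hfun, PySem.List.foldl_prod_mk
        (f := fun (u : List Char) i => if PySem.Chars.isupper i = true then u ++ [i] else u)
        (g := fun (v : List Char) i => if (!PySem.Chars.isupper i) = true then v ++ [i] else v),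
      PySem.List.foldl_append_if_eq_filter, PySem.List.foldl_append_if_eq_filter]
    simp
  simp only [solution, hsplit]

-- B computed over counts of s.toList
lemma solution_alt_eq_flatMaps (s : String) :
    solution_alt s = String.ofList
      (((PySem.List.pyRange 127 (-1) (-1)).filter
          (fun i => !(decide (65 ≤ i) && decide (i ≤ 90)))).flatMap
        (fun i => List.replicate (s.toList.count (Char.ofNat i.toNat)) (Char.ofNat i.toNat))
        ++ (PySem.List.pyRange 90 64 (-1)).flatMap
        (fun i => List.replicate (s.toList.count (Char.ofNat i.toNat)) (Char.ofNat i.toNat))) := by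
  unfold solution_alt
  rw [PySem.Dict.foldl_insert_getD_add_one_eq_counter]
  simp only [PySem.Dict.getD_counter, PySem.List.pyRepeat_singleton, Int.toNat_natCast]

lemma pyRange_neg_one_pairwise_gt (a b : Int) :
    (PySem.List.pyRange a b (-1)).Pairwise (· > ·) := by
  rw [PySem.List.pyRange_neg_one, List.pairwise_map]
  exact List.pairwise_lt_range.imp (fun h => by omega)

-- ===== VERDICT (by name: the statement is the Claim_ definition above) =====
theorem solution_spec : Claim_equal_solution := by
  intro s hdom
  show solution s = solution_alt s
  have hcode : ∀ c ∈ s.toList, c.toNat < 128 := by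
    intro c hc
    have := (List.all_eq_true.mp hdom) c hc
    unfold pvDomChar at this
    simp at this
    omega
  rw [solution_eq_filters, solution_alt_eq_flatMaps]
  congr 1
  congr 1
  · -- lo part
    have hcnt : ∀ i ∈ (PySem.List.pyRange 127 (-1) (-1)).filter
        (fun i => !(decide (65 ≤ i) && decide (i ≤ 90))),
        s.toList.count (Char.ofNat i.toNat)
          = (s.toList.filter (fun c => !PySem.Chars.isupper c)).count (Char.ofNat i.toNat) := by
      intro i hi
      have hb := PySem.List.mem_pyRange_neg_one.mp (List.mem_filter.mp hi).1
      have hcond := (List.mem_filter.mp hi).2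
      have hrt := toNat_ofNat_small i (by omega) (by omega)
      have : PySem.Chars.isupper (Char.ofNat i.toNat) = false := by
        rw [isupper_ascii _ (by omega)]
        simp at hcond ⊢
        omega
      rw [List.count_filter (by simp [this])]
    have hflat : ((PySem.List.pyRange 127 (-1) (-1)).filter
          (fun i => !(decide (65 ≤ i) && decide (i ≤ 90)))).flatMap
        (fun i => List.replicate (s.toList.count (Char.ofNat i.toNat)) (Char.ofNat i.toNat))
        = ((PySem.List.pyRange 127 (-1) (-1)).filter
          (fun i => !(decide (65 ≤ i) && decide (i ≤ 90)))).flatMap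
        (fun i => List.replicate ((s.toList.filter (fun c => !PySem.Chars.isupper c)).count
            (Char.ofNat i.toNat)) (Char.ofNat i.toNat)) := by
      unfold List.flatMap
      congr 1
      exact List.map_congr_left (fun i hi => by rw [hcnt i hi])
    rw [hflat]
    refine countsort_eq_sorted _ _ (List.Pairwise.filter _ (pyRange_neg_one_pairwise_gt 127 (-1))) ?_ ?_
    · intro d hd
      have := PySem.List.mem_pyRange_neg_one.mp (List.mem_filter.mp hd).1
      omega
    · intro c hc
      have hcf := List.mem_filter.mp hc
      have hlt := hcode c hcf.1
      have hup : PySem.Chars.isupper c = false := by simpa using hcf.2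
      rw [isupper_ascii c hlt] at hup
      refine List.mem_filter.mpr ⟨PySem.List.mem_pyRange_neg_one.mpr (by omega), ?_⟩
      simp at hup ⊢
      omega
  · -- up part
    have hcnt : ∀ i ∈ PySem.List.pyRange 90 64 (-1),
        s.toList.count (Char.ofNat i.toNat)
          = (s.toList.filter (fun c => PySem.Chars.isupper c)).count (Char.ofNat i.toNat) := by
      intro i hi
      have hb := PySem.List.mem_pyRange_neg_one.mp hi
      have hrt := toNat_ofNat_small i (by omega) (by omega)
      have : PySem.Chars.isupper (Char.ofNat i.toNat) = true := by
        rw [isupper_ascii _ (by omega)]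
        simp
        omega
      rw [List.count_filter (by simp [this])]
    have hflat : (PySem.List.pyRange 90 64 (-1)).flatMap
        (fun i => List.replicate (s.toList.count (Char.ofNat i.toNat)) (Char.ofNat i.toNat))
        = (PySem.List.pyRange 90 64 (-1)).flatMap
        (fun i => List.replicate ((s.toList.filter (fun c => PySem.Chars.isupper c)).count
            (Char.ofNat i.toNat)) (Char.ofNat i.toNat)) := by
      unfold List.flatMap
      congr 1
      exact List.map_congr_left (fun i hi => by rw [hcnt i hi])
    rw [hflat]
    refine countsort_eq_sorted _ _ (pyRange_neg_one_pairwise_gt 90 64) ?_ ?_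
    · intro d hd
      have := PySem.List.mem_pyRange_neg_one.mp hd
      omega
    · intro c hc
      have hcf := List.mem_filter.mp hc
      have hlt := hcode c hcf.1
      have hup : PySem.Chars.isupper c = true := hcf.2
      rw [isupper_ascii c hlt] at hup
      simp at hup
      exact PySem.List.mem_pyRange_neg_one.mpr (by omega)
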